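-- pv_equiv track=rewrite | github.com/ElchaabiMohamed/InferCode_SVM | Du-42487-python-files/program_40246.py | weird_case
-- ===== SOURCE A (Python) =====
-- def weird_case(some_str):
-- 	a = []
-- 	line = some_str.strip("\n").split(" ")
-- 	i = 0
-- 	while i < len(line):
-- 		word = line[i]
-- 		x = 0
-- 		while x < len(word):
-- 			a.append(word[x])
-- 			x = x + 1
-- 		a.append(" ")
-- 		i = i + 1
-- 	del a[len(a) - 1]
-- 	x = -1
-- 	i = 0
-- 	while i <len(a):
-- 		if a[i] != " ":
-- 			x = x + 1
-- 		if x == 0 or x % 2 == 0: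
-- 		    a[i] =str(a[i].upper())
-- 		i = i + 1
-- 	return " ".join(a)
-- ===== SOURCE B (Python) =====
-- def weird_case(some_str):
--     s = some_str.strip("\n")
--     res = []
--     count = -1
--     for ch in s:
--         if ch != " ":
--             count = count + 1
--         res.append(ch.upper() if count % 2 == 0 else ch)
--     return " ".join(res)
-- ===== Notes on version B (the rewrite author's own statement) =====
-- stated objective: simpler
-- what changed: B drops A's split-into-words/rebuild-char-list stage and its index-based mutation loop, doing one direct fold over the newline-stripped string that counts non-space characters and uppercases the even-counted ones.
import Mathlib
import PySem

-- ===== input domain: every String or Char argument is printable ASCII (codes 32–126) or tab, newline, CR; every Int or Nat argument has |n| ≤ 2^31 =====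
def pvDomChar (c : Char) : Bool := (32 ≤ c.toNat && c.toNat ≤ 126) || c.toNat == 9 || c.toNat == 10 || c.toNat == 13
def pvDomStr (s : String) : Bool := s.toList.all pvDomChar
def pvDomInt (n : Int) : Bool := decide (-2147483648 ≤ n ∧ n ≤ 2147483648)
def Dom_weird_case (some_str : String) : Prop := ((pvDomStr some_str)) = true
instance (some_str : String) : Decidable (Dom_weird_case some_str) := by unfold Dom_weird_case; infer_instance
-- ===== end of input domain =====

-- B replaces A's tokenize-and-rebuild stage by one direct pass over the stripped string (objective: simpler).

-- ===== PORT A =====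
-- second while loop of A: walk the char list left to right, carrying the counter x
def weirdTransA : List Char → Int → List Char
  | [], _ => []
  | c :: rest, x =>
    let x' := if c ≠ ' ' then x + 1 else x
    let c' := if x' = 0 ∨ PySem.Int.mod x' 2 = 0 then PySem.Chars.upperChar c else c
    c' :: weirdTransA rest x'

def weird_case (some_str : String) : String :=
  -- line = some_str.strip("\n").split(" ")
  let line := PySem.Chars.splitOn (PySem.Chars.stripChars some_str.toList ['\n']) [' ']
  -- first while loop: append each word's chars one by one, then a space, per word
  let a0 := line.foldl (fun a word => (word.foldl (fun a c => a ++ [c]) a) ++ [' ']) []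
  -- del a[len(a) - 1]
  let a1 := a0.dropLast
  -- second while loop
  let a2 := weirdTransA a1 (-1)
  -- " ".join(a)
  String.ofList (PySem.Chars.join [' '] (a2.map (fun c => [c])))

-- ===== PORT B =====
def weird_case_alt (some_str : String) : String :=
  let s := PySem.Chars.stripChars some_str.toList ['\n']
  let res := (s.foldl
    (fun (st : Int × List Char) ch =>
      let count := if ch ≠ ' ' then st.1 + 1 else st.1
      (count, st.2 ++ [if PySem.Int.mod count 2 = 0 then PySem.Chars.upperChar ch else ch]))
    ((-1 : Int), ([] : List Char))).2
  String.ofList (PySem.Chars.join [' '] (res.map (fun c => [c])))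

-- ===== PRECONDITION & SPEC =====
def Spec_weird_case (some_str : String) (out : String) : Prop := out = weird_case_alt some_str
instance (some_str : String) (out : String) : Decidable (Spec_weird_case some_str out) := by unfold Spec_weird_case; infer_instance

-- ===== CLAIM (what is proved, stated in full; the proofs are below) =====
def Claim_equal_weird_case : Prop := ∀ (some_str : String), Dom_weird_case some_str → Spec_weird_case some_str (weird_case some_str)

-- ===== LEMMAS AND PROOFS =====

-- A's inner while loop appends the word's characters
theorem foldl_snoc (word a : List Char) :
    word.foldl (fun a c => a ++ [c]) a = a ++ word := by
  induction word generalizing a with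
  | nil => simp
  | cons c rest ih => simp [List.foldl_cons, ih]

-- A's rebuild fold, characterised
theorem rebuild_eq (line : List (List Char)) (init : List Char) :
    line.foldl (fun a word => (word.foldl (fun a c => a ++ [c]) a) ++ [' ']) init
      = init ++ line.flatMap (fun w => w ++ [' ']) := by
  induction line generalizing init with
  | nil => simp
  | cons w rest ih =>
    rw [List.foldl_cons, foldl_snoc, ih]
    simp

-- splitting on a single space and re-gluing with a trailing space reproduces the string
theorem go_rebuild (fuel : Nat) :
    ∀ (l cur : List Char) (accs : List (List Char)),
    (PySem.Chars.splitOn.go [' '] fuel l cur accs).flatMap (fun w => w ++ [' '])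
      = accs.reverse.flatMap (fun w => w ++ [' ']) ++ cur.reverse ++ l ++ [' '] := by
  induction fuel with
  | zero =>
    intro l cur accs
    simp [PySem.Chars.splitOn.go]
  | succ n ih =>
    intro l cur accs
    cases l with
    | nil => simp [PySem.Chars.splitOn.go]
    | cons c rest =>
      by_cases hc : c = ' '
      · subst hc
        simp only [PySem.Chars.splitOn.go, List.isPrefixOf, BEq.rfl, Bool.true_and,
          if_pos, List.length_cons, List.length_nil, List.drop_succ_cons,
          List.drop_zero]
        rw [ih]
        simp
      · have hp : ([' '] : List Char).isPrefixOf (c :: rest) = false := by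
          simp [List.isPrefixOf]
          intro h; exact absurd h.symm hc
        simp only [PySem.Chars.splitOn.go, hp, Bool.false_eq_true, if_false]
        rw [ih]
        simp

theorem splitOn_rebuild (s : List Char) :
    (PySem.Chars.splitOn s [' ']).flatMap (fun w => w ++ [' ']) = s ++ [' '] := by
  unfold PySem.Chars.splitOn
  rw [go_rebuild]
  simp

-- the disjunction in A collapses: x = 0 already has x % 2 = 0
theorem cond_collapse (x : Int) :
    ((x = 0 ∨ PySem.Int.mod x 2 = 0)) ↔ (PySem.Int.mod x 2 = 0) := by
  constructor
  · rintro (rfl | h)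
    · decide
    · exact h
  · intro h; exact Or.inr h

-- B's single fold computes exactly A's second while loop
theorem fold_eq_trans (l : List Char) :
    ∀ (x : Int) (acc : List Char),
    (l.foldl
      (fun (st : Int × List Char) ch =>
        let count := if ch ≠ ' ' then st.1 + 1 else st.1
        (count, st.2 ++ [if PySem.Int.mod count 2 = 0 then PySem.Chars.upperChar ch else ch]))
      (x, acc)).2 = acc ++ weirdTransA l x := by
  induction l with
  | nil => intro x acc; simp [weirdTransA]
  | cons c rest ih =>
    intro x acc
    simp only [List.foldl_cons, weirdTransA]
    rw [ih]
    by_cases h0 : PySem.Int.mod (if c ≠ ' ' then x + 1 else x) 2 = 0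
    · rw [if_pos ((cond_collapse _).mpr h0), if_pos h0]; simp
    · rw [if_neg (fun hd => h0 ((cond_collapse _).mp hd)), if_neg h0]; simp

-- ===== VERDICT (by name: the statement is the Claim_ definition above) =====
theorem weird_case_spec : Claim_equal_weird_case := by
  intro some_str _
  unfold Spec_weird_case weird_case weird_case_alt
  dsimp only
  rw [rebuild_eq, splitOn_rebuild]
  simp only [List.nil_append, List.dropLast_concat]
  rw [fold_eq_trans]
  simp
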